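-- pv_equiv track=rewrite | github.com/nixxholas/IS111-rekt | LabTest/Lab Test 2 (AY2018-19 T1)/hwchen.2020/q4.py | build_interchanges
-- ===== SOURCE A (Python) =====
-- def build_interchanges(mrt_map):
--     # Sample.
--     # (line1_index, line2_index, line1_stn_index, line2_stn_index, stn_name)
--     intersections = set()
--     # Loop every line once again
--     for line in mrt_map:
--         # Loop every station
--         for i in range(len(line)):
--             cur_stn = line[i]  # Set the current station just in case.
--
--             # Loop every other line:
--             for other_line in mrt_map:
--                 # Make sure its not the line we're checking on and ensure that the cur_stn also exist in this
--                 # other line.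
--                 if other_line is not line and cur_stn in other_line:
--                     # Since it is, its a cross section.
--                     intersections.add((mrt_map.index(line), mrt_map.index(other_line), i, other_line.index(cur_stn),
--                                        cur_stn))
--
--     return list(intersections)
-- ===== SOURCE B (Python) =====
-- def build_interchanges(mrt_map):
--     # Station name -> [(line position, first station index in that line)].
--     byname = {}
--     for q, line in enumerate(mrt_map):
--         seen = set()
--         for j, name in enumerate(line):
--             if name not in seen:
--                 seen.add(name)
--                 byname.setdefault(name, []).append((q, j))
--     # Emit cross-line pairs in one pass over all stations.
--     out = set()
--     for p, line in enumerate(mrt_map):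
--         for i, name in enumerate(line):
--             for q, j in byname[name]:
--                 if q != p:
--                     out.add((p, q, i, j, name))
--     return list(out)
-- ===== Notes on version B (the rewrite author's own statement) =====
-- stated objective: faster
-- what changed: Replaces the triple nested scans (every line x every station x every other line, with repeated list.index scans inside) with one linear pass building a station-name -> (line position, first index) map and one pass emitting the cross-line pairs from it; Pre_ excludes maps containing two equal lines, where A's mrt_map.index(line) first-match value (and the interplay with 'is not') is accidental.
-- outside the precondition, e.g. on build_interchanges([[''], ['']]): A returns [(0, 0, 0, 0, '')], B returns [(0, 1, 0, 0, ''), (1, 0, 0, 0, '')]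
import Mathlib
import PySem

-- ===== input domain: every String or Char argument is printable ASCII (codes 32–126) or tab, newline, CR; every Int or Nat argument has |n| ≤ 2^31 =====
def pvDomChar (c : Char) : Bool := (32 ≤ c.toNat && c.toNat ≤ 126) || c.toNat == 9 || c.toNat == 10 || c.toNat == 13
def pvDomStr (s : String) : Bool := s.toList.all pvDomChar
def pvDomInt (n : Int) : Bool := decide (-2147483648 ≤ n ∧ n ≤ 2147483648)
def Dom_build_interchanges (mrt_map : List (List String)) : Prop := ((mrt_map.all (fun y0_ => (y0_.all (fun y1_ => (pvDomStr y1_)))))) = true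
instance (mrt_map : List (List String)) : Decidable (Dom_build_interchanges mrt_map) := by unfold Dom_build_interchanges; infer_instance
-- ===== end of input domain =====

-- B builds a station-name → (line position, first index) map in one linear pass and emits the
-- cross-line pairs directly from it, instead of A's nested scans over every line × station ×
-- other line with repeated .index scans (objective: faster).
-- Both return list(set(...)); the ports return the set's first-insertion-order list and the
-- Python list is compared with it as a set.

-- ===== PORT A =====
-- `other_line is not line` is ported as distinct positions: on maps with pairwise distinct
-- lines (Pre_ below) the lists of a literal argument are distinct objects, so identity
-- coincides with position (exact on such inputs).
def build_interchanges (mrt_map : List (List String)) : List (Int × Int × Int × Int × String) :=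
  (PySem.List.enumerate mrt_map).foldl (fun inter pl =>
    -- for i in range(len(line)): cur_stn = line[i]  — ported as the enumerated line (same pairs)
    (PySem.List.enumerate pl.2).foldl (fun inter ic =>
      (PySem.List.enumerate mrt_map).foldl (fun inter qo =>
        if qo.1 ≠ pl.1 ∧ ic.2 ∈ qo.2 then
          PySem.Set.add inter
            (((PySem.List.index? mrt_map pl.2).getD 0 : Int),
             ((PySem.List.index? mrt_map qo.2).getD 0 : Int),
             ic.1,
             ((PySem.List.index? qo.2 ic.2).getD 0 : Int),
             ic.2)
        else inter) inter) inter) PySem.Set.empty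

-- ===== PORT B =====
-- byname[name] = [(line position, first station index in that line)], ascending position
def pvByname (mrt_map : List (List String)) : PySem.Dict String (List (Int × Int)) :=
  (PySem.List.enumerate mrt_map).foldl (fun d ql =>
    ((PySem.List.enumerate ql.2).foldl
      (fun (st : PySem.Set String × PySem.Dict String (List (Int × Int))) jn =>
        if jn.2 ∈ st.1 then st
        else (PySem.Set.add st.1 jn.2,
              st.2.modify jn.2 [] (fun l => l ++ [(ql.1, jn.1)])))
      (PySem.Set.empty, d)).2)
    PySem.Dict.empty

def build_interchanges_alt (mrt_map : List (List String)) : List (Int × Int × Int × Int × String) :=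
  let byname := pvByname mrt_map
  (PySem.List.enumerate mrt_map).foldl (fun out pl =>
    (PySem.List.enumerate pl.2).foldl (fun out ic =>
      (byname.getD ic.2 []).foldl (fun out qj =>
        if qj.1 ≠ pl.1 then
          PySem.Set.add out (pl.1, qj.1, ic.1, qj.2, ic.2)
        else out) out) out) PySem.Set.empty

-- ===== PRECONDITION & SPEC =====
-- Pre_ excludes maps containing two equal lines: there A's tuple indices come from
-- mrt_map.index(line)'s first-match rule combined with object identity ('is not'), an
-- accidental corner no caller would specify; B reports each line by its own position.
def Pre_build_interchanges (mrt_map : List (List String)) : Prop := mrt_map.Nodup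
instance (mrt_map : List (List String)) : Decidable (Pre_build_interchanges mrt_map) := by unfold Pre_build_interchanges; infer_instance
def pvWitness_build_interchanges : List (List String) := [["a", "b"], ["b", "c"], ["c", "a"]]

def Spec_build_interchanges (mrt_map : List (List String)) (out : List (Int × Int × Int × Int × String)) : Prop := out = build_interchanges_alt mrt_map
instance (mrt_map : List (List String)) (out : List (Int × Int × Int × Int × String)) : Decidable (Spec_build_interchanges mrt_map out) := by unfold Spec_build_interchanges; infer_instance

-- ===== CLAIM (what is proved, stated in full; the proofs are below) =====
def Claim_equal_build_interchanges : Prop := ∀ (mrt_map : List (List String)), Dom_build_interchanges mrt_map → Pre_build_interchanges mrt_map → Spec_build_interchanges mrt_map (build_interchanges mrt_map)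

-- ===== LEMMAS AND PROOFS =====

-- first index of an equal element, as the Int the ports put in the output tuples
def pvLineIdx (m : List (List String)) (l : List String) : Int := ((PySem.List.index? m l).getD 0 : Int)
def pvStnIdx (l : List String) (c : String) : Int := ((PySem.List.index? l c).getD 0 : Int)

-- generic loop shapes
theorem pvFoldl_update {α β : Type} [BEq α] (l : List β) (g : β → List α) (s : PySem.Set α) :
    l.foldl (fun s x => PySem.Set.update s (g x)) s = PySem.Set.update s (l.flatMap g) := by
  induction l generalizing s with
  | nil => simp [PySem.Set.update_nil]
  | cons x xs ih => simp [List.flatMap_cons, PySem.Set.update_append, ih]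

theorem pvFoldl_add_ite {α β : Type} [BEq α] (l : List β) (p : β → Prop) [DecidablePred p]
    (f : β → α) (s : PySem.Set α) :
    l.foldl (fun s x => if p x then PySem.Set.add s (f x) else s) s
      = PySem.Set.update s ((l.filter (fun x => decide (p x))).map f) := by
  rw [PySem.List.foldl_ite_eq_foldl_filter, PySem.Set.update_map_eq_foldl_add]

-- the canonical add-sequences of the two ports
def pvBigA (m : List (List String)) : List (Int × Int × Int × Int × String) :=
  (PySem.List.enumerate m).flatMap (fun pl =>
    (PySem.List.enumerate pl.2).flatMap (fun ic =>
      ((PySem.List.enumerate m).filter (fun qo => decide (qo.1 ≠ pl.1 ∧ ic.2 ∈ qo.2))).map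
        (fun qo => (pvLineIdx m pl.2, pvLineIdx m qo.2, ic.1, pvStnIdx qo.2 ic.2, ic.2))))

def pvBigB (m : List (List String)) : List (Int × Int × Int × Int × String) :=
  (PySem.List.enumerate m).flatMap (fun pl =>
    (PySem.List.enumerate pl.2).flatMap (fun ic =>
      (((pvByname m).getD ic.2 []).filter (fun qj => decide (qj.1 ≠ pl.1))).map
        (fun qj => (pl.1, qj.1, ic.1, qj.2, ic.2))))

theorem pvA_eq (m : List (List String)) :
    build_interchanges m = PySem.Set.ofList (pvBigA m) := by
  unfold build_interchanges pvBigA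
  simp only [pvFoldl_add_ite, pvFoldl_update]
  rw [show (PySem.Set.empty : PySem.Set (Int × Int × Int × Int × String)) = [] from rfl,
      PySem.Set.update_nil_left]
  rfl

theorem pvB_eq (m : List (List String)) :
    build_interchanges_alt m = PySem.Set.ofList (pvBigB m) := by
  unfold build_interchanges_alt pvBigB
  simp only [pvFoldl_add_ite, pvFoldl_update]
  rw [show (PySem.Set.empty : PySem.Set (Int × Int × Int × Int × String)) = [] from rfl,
      PySem.Set.update_nil_left]

-- membership in an enumerated list
theorem pvMem_enumerate {α : Type} (xs : List α) :
    ∀ (k : Int) (pr : Int × α), pr ∈ PySem.List.enumerate xs k →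
      ∃ n : Nat, pr.1 = k + n ∧ xs[n]? = some pr.2 := by
  induction xs with
  | nil => intro k pr h; simp [PySem.List.enumerate_nil] at h
  | cons x xs ih =>
    intro k pr h
    rw [PySem.List.enumerate_cons] at h
    rcases List.mem_cons.mp h with h | h
    · exact ⟨0, by simp [h]⟩
    · obtain ⟨n, hn, hget⟩ := ih (k + 1) pr h
      exact ⟨n + 1, by push_cast; omega, by simpa using hget⟩

-- first-index arithmetic
theorem pvStnIdx_cons_self (cur : String) (rest : List String) :
    pvStnIdx (cur :: rest) cur = 0 := by
  unfold pvStnIdx; rw [PySem.List.index?_cons_self]; rfl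

theorem pvStnIdx_cons_of_ne (x cur : String) (rest : List String) (h : ¬ cur = x)
    (hm : cur ∈ rest) : pvStnIdx (x :: rest) cur = pvStnIdx rest cur + 1 := by
  unfold pvStnIdx
  rw [PySem.List.index?_cons_of_ne rest (fun he => h he.symm)]
  obtain ⟨j, hj⟩ := Option.isSome_iff_exists.mp
    ((PySem.List.index?_isSome_iff rest cur).mpr hm)
  rw [hj]
  simp

-- on a duplicate-free list, index? of an element is its position
theorem pvIndex?_of_nodup {α : Type} [BEq α] [LawfulBEq α] :
    ∀ (xs : List α), xs.Nodup → ∀ (n : Nat) (x : α), xs[n]? = some x →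
      PySem.List.index? xs x = some n := by
  intro xs
  induction xs with
  | nil => intro _ n x h; simp at h
  | cons y ys ih =>
    intro hnd n x h
    cases n with
    | zero =>
      simp only [List.getElem?_cons_zero, Option.some.injEq] at h
      subst h
      rw [PySem.List.index?_cons_self]
    | succ n =>
      simp only [List.getElem?_cons_succ] at h
      have hxy : x ∈ ys := List.mem_of_getElem? h
      have hne : ¬ y = x := fun he => (List.nodup_cons.mp hnd).1 (he ▸ hxy)
      rw [PySem.List.index?_cons_of_ne ys hne,
          ih (List.nodup_cons.mp hnd).2 n x h]
      rfl

theorem pvLineIdx_pos (m : List (List String)) (hnd : m.Nodup) (pl : Int × List String)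
    (h : pl ∈ PySem.List.enumerate m 0) : pvLineIdx m pl.2 = pl.1 := by
  obtain ⟨n, hn, hget⟩ := pvMem_enumerate m 0 pl h
  unfold pvLineIdx
  rw [pvIndex?_of_nodup m hnd n pl.2 hget]
  simp [hn]

-- characterization of the byname pass, inner loop
theorem pvByname_inner (q : Int) (cur : String) :
    ∀ (line : List String) (k : Int) (seen : PySem.Set String)
      (d : PySem.Dict String (List (Int × Int))),
    (((PySem.List.enumerate line k).foldl
        (fun (st : PySem.Set String × PySem.Dict String (List (Int × Int))) jn =>
          if jn.2 ∈ st.1 then st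
          else (PySem.Set.add st.1 jn.2,
                st.2.modify jn.2 [] (fun l => l ++ [(q, jn.1)])))
        (seen, d)).2).getD cur []
    = if cur ∉ seen ∧ cur ∈ line
      then d.getD cur [] ++ [(q, k + pvStnIdx line cur)]
      else d.getD cur [] := by
  intro line
  induction line with
  | nil => intro k seen d; simp [PySem.List.enumerate_nil]
  | cons x rest ih =>
    intro k seen d
    rw [PySem.List.enumerate_cons, List.foldl_cons]
    by_cases hx : x ∈ seen
    · simp only [hx, if_true]
      rw [ih (k + 1) seen d]
      by_cases hcx : cur = x
      · subst hcx; simp [hx]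
      · simp only [List.mem_cons, hcx, false_or]
        by_cases hcs : cur ∈ seen
        · simp [hcs]
        · by_cases hcr : cur ∈ rest
          · rw [if_pos ⟨hcs, hcr⟩, if_pos ⟨hcs, hcr⟩]
            rw [pvStnIdx_cons_of_ne x cur rest hcx hcr]
            have harith : k + 1 + pvStnIdx rest cur = k + (pvStnIdx rest cur + 1) := by ring
            rw [harith]
          · simp [hcs, hcr]
    · simp only [hx, if_false]
      rw [ih (k + 1) (PySem.Set.add seen x) (d.modify x [] (fun l => l ++ [(q, k)]))]
      by_cases hcx : cur = x
      · subst hcx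
        have hmem : cur ∈ PySem.Set.add seen cur := by
          rw [PySem.Set.mem_add]; right; rfl
        rw [if_neg (by simp [hmem])]
        rw [PySem.Dict.getD_modify_self]
        rw [if_pos ⟨hx, List.mem_cons_self⟩]
        rw [pvStnIdx_cons_self]
        norm_num
      · have hmem : (cur ∈ PySem.Set.add seen x) ↔ cur ∈ seen := by
          rw [PySem.Set.mem_add]; simp [hcx]
        rw [PySem.Dict.getD_modify_of_ne _ _ _ hcx]
        simp only [hmem, List.mem_cons, hcx, false_or]
        by_cases hcs : cur ∈ seen
        · simp [hcs]
        · by_cases hcr : cur ∈ rest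
          · rw [if_pos ⟨hcs, hcr⟩, if_pos ⟨hcs, hcr⟩]
            rw [pvStnIdx_cons_of_ne x cur rest hcx hcr]
            have harith : k + 1 + pvStnIdx rest cur = k + (pvStnIdx rest cur + 1) := by ring
            rw [harith]
          · simp [hcs, hcr]

-- characterization of the byname pass, outer loop
theorem pvByname_getD (cur : String) :
    ∀ (m : List (List String)) (k : Int) (d0 : PySem.Dict String (List (Int × Int))),
    ((PySem.List.enumerate m k).foldl (fun d ql =>
        ((PySem.List.enumerate ql.2).foldl
          (fun (st : PySem.Set String × PySem.Dict String (List (Int × Int))) jn =>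
            if jn.2 ∈ st.1 then st
            else (PySem.Set.add st.1 jn.2,
                  st.2.modify jn.2 [] (fun l => l ++ [(ql.1, jn.1)])))
          (PySem.Set.empty, d)).2) d0).getD cur []
    = d0.getD cur []
        ++ ((PySem.List.enumerate m k).filter (fun qo => decide (cur ∈ qo.2))).map
             (fun qo => (qo.1, pvStnIdx qo.2 cur)) := by
  intro m
  induction m with
  | nil => intro k d0; simp [PySem.List.enumerate_nil]
  | cons line rest ih =>
    intro k d0
    rw [PySem.List.enumerate_cons, List.foldl_cons, List.filter_cons]
    rw [ih (k + 1), pvByname_inner k cur line 0 PySem.Set.empty d0]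
    have hemp : cur ∉ (PySem.Set.empty : PySem.Set String) := by
      simp [PySem.Set.empty]
    by_cases hc : cur ∈ line
    · rw [if_pos ⟨hemp, hc⟩]
      simp [hc, List.append_assoc]
    · rw [if_neg (by simp [hc])]
      simp [hc]

theorem pvByname_getD' (m : List (List String)) (cur : String) :
    (pvByname m).getD cur []
    = ((PySem.List.enumerate m).filter (fun qo => decide (cur ∈ qo.2))).map
        (fun qo => (qo.1, pvStnIdx qo.2 cur)) := by
  unfold pvByname
  rw [pvByname_getD cur m 0 PySem.Dict.empty]
  simp [PySem.Dict.getD_empty]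

-- the two add-sequences are equal on duplicate-free maps
theorem pvBig_eq (m : List (List String)) (hnd : m.Nodup) : pvBigA m = pvBigB m := by
  unfold pvBigA pvBigB
  apply List.flatMap_congr; intro pl hpl
  apply List.flatMap_congr; intro ic _
  rw [pvByname_getD' m ic.2, List.filter_map, List.filter_filter]
  rw [List.map_map]
  have hp : (fun (qo : Int × List String) => decide (qo.1 ≠ pl.1 ∧ ic.2 ∈ qo.2))
      = fun qo => (((fun (qj : Int × Int) => decide (qj.1 ≠ pl.1)) ∘
          fun qo => (qo.1, pvStnIdx qo.2 ic.2)) qo && decide (ic.2 ∈ qo.2)) := by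
    funext qo
    by_cases h1 : qo.1 ≠ pl.1 <;> by_cases h2 : ic.2 ∈ qo.2 <;>
      simp [h1, h2, Function.comp]
  rw [hp]
  apply List.map_congr_left
  intro qo hqo
  have hqm : qo ∈ PySem.List.enumerate m 0 := (List.mem_filter.mp hqo).1
  simp only [Function.comp]
  rw [pvLineIdx_pos m hnd pl hpl, pvLineIdx_pos m hnd qo hqm]

-- ===== VERDICT (by name: the statement is the Claim_ definition above) =====
theorem build_interchanges_spec : Claim_equal_build_interchanges := by
  intro m _ hpre
  unfold Spec_build_interchanges
  rw [pvA_eq, pvB_eq, pvBig_eq m hpre]
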